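-- pv_equiv track=rewrite | github.com/ceccato88/openclaw_trading | debate/context_builder.py | _pick_default_symbols
-- ===== SOURCE A (Python) =====
-- from typing import Any, Dict, List, Sequence
--
-- FALLBACK_SYMBOLS = ["BTC", "ETH", "SOL"]
--
-- def _pick_default_symbols(scanner_results: Sequence[Dict[str, Any]], lookup: Dict[str, Dict[str, Any]], limit: int = 3) -> List[str]:
--     symbols: List[str] = []
--     for candidate in scanner_results:
--         coin = candidate.get("coin")
--         if coin and coin not in symbols:
--             symbols.append(coin)
--         if len(symbols) >= limit:
--             return symbols
--
--     for coin in FALLBACK_SYMBOLS: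
--         if coin in lookup and coin not in symbols:
--             symbols.append(coin)
--         if len(symbols) >= limit:
--             break
--     return symbols
-- ===== SOURCE B (Python) =====
-- FALLBACK_SYMBOLS = ["BTC", "ETH", "SOL"]
--
-- def _pick_default_symbols(scanner_results, lookup, limit=3):
--     coins = [c.get("coin") for c in scanner_results if c.get("coin")]
--     coins += [c for c in FALLBACK_SYMBOLS if c in lookup]
--     return list(dict.fromkeys(coins))[:max(limit, 0)]
-- ===== Notes on version B (the rewrite author's own statement) =====
-- stated objective: simpler
-- what changed: Replaces A's two capped dedup loops with early return/break by computing the full ordered candidate list (truthy scanner coins then fallback symbols present in lookup), deduplicating it once with dict.fromkeys, and slicing the first max(limit,0) entries; no limit logic inside any loop.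
-- intended difference: When limit <= 0 and A would still pick one symbol (the first scanner candidate has a truthy coin, or the scanner is empty and BTC is in lookup), A returns that one-element list because it checks the limit only after appending, while B returns [], the intended value since at most `limit` symbols were requested. — e.g. on _pick_default_symbols([[("coin", "X")]], [], 0): A returns ["X"], B returns []
import Mathlib
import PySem

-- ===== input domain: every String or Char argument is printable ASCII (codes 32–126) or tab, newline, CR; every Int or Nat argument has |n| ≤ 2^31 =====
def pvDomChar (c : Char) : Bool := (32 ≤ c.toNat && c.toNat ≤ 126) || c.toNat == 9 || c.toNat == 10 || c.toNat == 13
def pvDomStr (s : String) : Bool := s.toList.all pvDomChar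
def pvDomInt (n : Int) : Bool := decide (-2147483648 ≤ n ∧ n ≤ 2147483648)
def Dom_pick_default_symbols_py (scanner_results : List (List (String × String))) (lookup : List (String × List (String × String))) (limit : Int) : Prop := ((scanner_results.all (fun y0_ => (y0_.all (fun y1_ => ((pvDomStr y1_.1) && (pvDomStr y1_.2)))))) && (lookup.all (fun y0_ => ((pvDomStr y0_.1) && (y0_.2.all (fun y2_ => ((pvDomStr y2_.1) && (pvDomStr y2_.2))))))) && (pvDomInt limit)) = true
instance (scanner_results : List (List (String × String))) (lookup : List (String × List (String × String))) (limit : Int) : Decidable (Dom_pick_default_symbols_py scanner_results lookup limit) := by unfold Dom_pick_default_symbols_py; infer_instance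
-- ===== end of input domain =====

-- B replaces A's two capped dedup loops (early return/break) by: build the full candidate list,
-- dedup it once (dict.fromkeys), slice the first max(limit,0) entries; objective: simpler.

-- ===== PORT A =====
def pvFallbackSymbols : List String := ["BTC", "ETH", "SOL"]

-- first loop of A: returns (symbols, true) on the early `return`, (symbols, false) if it falls through
def pickA_scan (limit : Int) : List (List (String × String)) → List String → (List String × Bool)
  | [], symbols => (symbols, false)
  | candidate :: rest, symbols =>
    let symbols :=
      match List.lookup "coin" candidate with
      | some coin => if coin ≠ "" ∧ ¬ symbols.contains coin then symbols ++ [coin] else symbols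
      | none => symbols
    if limit ≤ (symbols.length : Int) then (symbols, true) else pickA_scan limit rest symbols

-- second loop of A over FALLBACK_SYMBOLS, with its `break`
def pickA_fb (lookup : List (String × List (String × String))) (limit : Int) : List String → List String → List String
  | [], symbols => symbols
  | coin :: rest, symbols =>
    let symbols :=
      if (List.lookup coin lookup).isSome ∧ ¬ symbols.contains coin then symbols ++ [coin] else symbols
    if limit ≤ (symbols.length : Int) then symbols else pickA_fb lookup limit rest symbols

def pick_default_symbols_py (scanner_results : List (List (String × String))) (lookup : List (String × List (String × String))) (limit : Int) : List String :=
  match pickA_scan limit scanner_results [] with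
  | (symbols, true) => symbols
  | (symbols, false) => pickA_fb lookup limit pvFallbackSymbols symbols

-- ===== PORT B =====
-- coins = [c.get("coin") for c in scanner_results if c.get("coin")] + [c for c in FALLBACK_SYMBOLS if c in lookup]
-- return list(dict.fromkeys(coins))[:max(limit, 0)]   (dict.fromkeys = PySem.List.dedup; the slice
-- upper bound max(limit,0) is ≥ 0, so [:n] is List.take n — exact)
def pick_default_symbols_py_alt (scanner_results : List (List (String × String))) (lookup : List (String × List (String × String))) (limit : Int) : List String :=
  let coins :=
    (scanner_results.filter (fun c => (List.lookup "coin" c).getD "" ≠ "")).map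
        (fun c => (List.lookup "coin" c).getD "")
      ++ pvFallbackSymbols.filter (fun c => (List.lookup c lookup).isSome)
  (PySem.List.dedup coins).take (max limit 0).toNat

-- ===== PRECONDITION & SPEC =====
-- When limit ≤ 0 and A would still pick one symbol (first scanner candidate has a truthy coin, or
-- scanner empty and "BTC" in lookup), A returns that one-element list (it checks the limit only
-- after appending) while B returns [], the intended value since at most `limit` symbols were asked for.
def D_pick_default_symbols_py (scanner_results : List (List (String × String))) (lookup : List (String × List (String × String))) (limit : Int) : Prop :=
  limit ≤ 0 ∧
    (if scanner_results = [] then (List.lookup "BTC" lookup).isSome = true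
     else (List.lookup "coin" (scanner_results.headD [])).getD "" ≠ "")
instance (scanner_results : List (List (String × String))) (lookup : List (String × List (String × String))) (limit : Int) : Decidable (D_pick_default_symbols_py scanner_results lookup limit) := by unfold D_pick_default_symbols_py; infer_instance

def Spec_pick_default_symbols_py (scanner_results : List (List (String × String))) (lookup : List (String × List (String × String))) (limit : Int) (out : List String) : Prop := ¬ D_pick_default_symbols_py scanner_results lookup limit → out = pick_default_symbols_py_alt scanner_results lookup limit
instance (scanner_results : List (List (String × String))) (lookup : List (String × List (String × String))) (limit : Int) (out : List String) : Decidable (Spec_pick_default_symbols_py scanner_results lookup limit out) := by unfold Spec_pick_default_symbols_py; infer_instance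

def pvDiffWitness_pick_default_symbols_py : (List (List (String × String))) × (List (String × List (String × String))) × Int := ([[("coin", "X")]], [], 0)
def pvDiffWitnessOut_pick_default_symbols_py : (List String) × (List String) := (["X"], [])

-- ===== CLAIM (what is proved, stated in full; the proofs are below) =====
def Claim_unchanged_pick_default_symbols_py : Prop := ∀ (scanner_results : List (List (String × String))) (lookup : List (String × List (String × String))) (limit : Int), Dom_pick_default_symbols_py scanner_results lookup limit → Spec_pick_default_symbols_py scanner_results lookup limit (pick_default_symbols_py scanner_results lookup limit)
def Claim_changed_pick_default_symbols_py : Prop := Dom_pick_default_symbols_py (pvDiffWitness_pick_default_symbols_py.1) (pvDiffWitness_pick_default_symbols_py.2.1) (pvDiffWitness_pick_default_symbols_py.2.2) ∧ D_pick_default_symbols_py (pvDiffWitness_pick_default_symbols_py.1) (pvDiffWitness_pick_default_symbols_py.2.1) (pvDiffWitness_pick_default_symbols_py.2.2) ∧ pick_default_symbols_py (pvDiffWitness_pick_default_symbols_py.1) (pvDiffWitness_pick_default_symbols_py.2.1) (pvDiffWitness_pick_default_symbols_py.2.2) = pvDiffWitnessOut_pick_default_symbols_py.1 ∧ pick_default_symbols_py_alt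 (pvDiffWitness_pick_default_symbols_py.1) (pvDiffWitness_pick_default_symbols_py.2.1) (pvDiffWitness_pick_default_symbols_py.2.2) = pvDiffWitnessOut_pick_default_symbols_py.2 ∧ pvDiffWitnessOut_pick_default_symbols_py.1 ≠ pvDiffWitnessOut_pick_default_symbols_py.2
def Claim_exact_pick_default_symbols_py : Prop := ∀ (scanner_results : List (List (String × String))) (lookup : List (String × List (String × String))) (limit : Int), Dom_pick_default_symbols_py scanner_results lookup limit → D_pick_default_symbols_py scanner_results lookup limit → pick_default_symbols_py scanner_results lookup limit ≠ pick_default_symbols_py_alt scanner_results lookup limit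

-- ===== LEMMAS AND PROOFS =====

-- the truthy coins of the scanner records, in order (the stream A's first loop dedups)
def coinsOf (xs : List (List (String × String))) : List String :=
  (xs.filter (fun c => (List.lookup "coin" c).getD "" ≠ "")).map
    (fun c => (List.lookup "coin" c).getD "")

-- folding Set.add only ever appends at the end
theorem foldl_add_prefix (l : List String) (s : List String) :
    ∃ t, l.foldl PySem.Set.add s = s ++ t := by
  induction l generalizing s with
  | nil => exact ⟨[], by simp⟩
  | cons x rest ih =>
    by_cases h : x ∈ s
    · obtain ⟨t, ht⟩ := ih s
      exact ⟨t, by simpa [PySem.Set.add, h] using ht⟩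
    · obtain ⟨t, ht⟩ := ih (s ++ [x])
      exact ⟨x :: t, by simp [PySem.Set.add, h, ht]⟩

-- A's first loop, characterised: it is the truncated Set.add-fold over the truthy coin stream,
-- with the flag recording whether the limit was reached
theorem pickA_scan_eq (limit : Int) (xs : List (List (String × String))) (s : List String)
    (hs : (s.length : Int) < limit) :
    pickA_scan limit xs s =
      (((coinsOf xs).foldl PySem.Set.add s).take limit.toNat,
       decide (limit ≤ (((coinsOf xs).foldl PySem.Set.add s).length : Int))) := by
  induction xs generalizing s with
  | nil =>
    have h1 : s.take limit.toNat = s := List.take_of_length_le (by omega)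
    simp [pickA_scan, coinsOf, h1, show ¬ limit ≤ (s.length : Int) by omega]
  | cons c rest ih =>
    have hstep : (match List.lookup "coin" c with
        | some coin => if coin ≠ "" ∧ ¬ s.contains coin then s ++ [coin] else s
        | none => s) =
        (if (List.lookup "coin" c).getD "" ≠ "" then PySem.Set.add s ((List.lookup "coin" c).getD "") else s) := by
      cases h : List.lookup "coin" c with
      | none => simp
      | some coin =>
        by_cases hc : coin = ""
        · simp [hc]
        · simp only [Option.getD_some, hc, ne_eq, not_false_eq_true, if_true, PySem.Set.add]
          by_cases hm : s.contains coin <;> simp [hm]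
    have hcoins : (coinsOf (c :: rest)).foldl PySem.Set.add s =
        (coinsOf rest).foldl PySem.Set.add
          (if (List.lookup "coin" c).getD "" ≠ "" then PySem.Set.add s ((List.lookup "coin" c).getD "") else s) := by
      unfold coinsOf
      by_cases hp : (List.lookup "coin" c).getD "" ≠ "" <;>
        simp [List.filter_cons, hp]
    simp only [pickA_scan, hstep]
    set s1 := (if (List.lookup "coin" c).getD "" ≠ "" then PySem.Set.add s ((List.lookup "coin" c).getD "") else s) with hs1
    have hlen : s1.length = s.length ∨ s1.length = s.length + 1 := by
      rw [hs1]
      by_cases hp : (List.lookup "coin" c).getD "" ≠ ""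
      · simp only [hp, if_true, PySem.Set.add]
        split_ifs <;> simp
      · simp [hp]
    by_cases hl : limit ≤ (s1.length : Int)
    · -- early return: s1 has exactly `limit` elements, and the fold only appends after s1
      have hexact : (s1.length : Int) = limit := by omega
      obtain ⟨t, ht⟩ := foldl_add_prefix (coinsOf rest) s1
      have htake : ((coinsOf rest).foldl PySem.Set.add s1).take limit.toNat = s1 := by
        rw [ht]
        have : limit.toNat = s1.length := by omega
        rw [this, List.take_left]
      have hflag : limit ≤ ((((coinsOf rest)).foldl PySem.Set.add s1).length : Int) := by
        rw [ht]; simp; omega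
      simp [hl, hcoins, htake, hflag]
    · simp only [hl, if_false, hcoins]
      exact ih s1 (by omega)

-- A's second loop, characterised the same way (the `break` only truncates the fold)
theorem pickA_fb_eq (lookup : List (String × List (String × String))) (limit : Int)
    (fb : List String) (s : List String) (hs : (s.length : Int) < limit) :
    pickA_fb lookup limit fb s =
      ((fb.filter (fun c => (List.lookup c lookup).isSome)).foldl PySem.Set.add s).take limit.toNat := by
  induction fb generalizing s with
  | nil =>
    simpa [pickA_fb] using (List.take_of_length_le (by omega : s.length ≤ limit.toNat)).symm
  | cons c rest ih =>
    have hstep : (if (List.lookup c lookup).isSome ∧ ¬ s.contains c then s ++ [c] else s) =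
        (if (List.lookup c lookup).isSome then PySem.Set.add s c else s) := by
      by_cases hin : (List.lookup c lookup).isSome
      · simp only [hin, true_and, if_true, PySem.Set.add]
        by_cases hm : s.contains c <;> simp [hm]
      · simp [hin]
    have hfold : ((c :: rest).filter (fun c => (List.lookup c lookup).isSome)).foldl PySem.Set.add s =
        (rest.filter (fun c => (List.lookup c lookup).isSome)).foldl PySem.Set.add
          (if (List.lookup c lookup).isSome then PySem.Set.add s c else s) := by
      by_cases hin : (List.lookup c lookup).isSome <;> simp [List.filter_cons, hin]
    simp only [pickA_fb, hstep, hfold]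
    set s1 := (if (List.lookup c lookup).isSome then PySem.Set.add s c else s) with hs1
    have hlen : s1.length = s.length ∨ s1.length = s.length + 1 := by
      rw [hs1]
      by_cases hin : (List.lookup c lookup).isSome
      · simp only [hin, if_true, PySem.Set.add]
        split_ifs <;> simp
      · simp [hin]
    by_cases hl : limit ≤ (s1.length : Int)
    · have hexact : (s1.length : Int) = limit := by omega
      obtain ⟨t, ht⟩ := foldl_add_prefix (rest.filter (fun c => (List.lookup c lookup).isSome)) s1
      have htake : ((rest.filter (fun c => (List.lookup c lookup).isSome)).foldl PySem.Set.add s1).take limit.toNat = s1 := by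
        rw [ht]
        have : limit.toNat = s1.length := by omega
        rw [this, List.take_left]
      simp [hl, htake]
    · simp only [hl, if_false]
      exact ih s1 (by omega)

theorem main_eq (scanner_results : List (List (String × String))) (lookup : List (String × List (String × String))) (limit : Int)
    (hD : ¬ D_pick_default_symbols_py scanner_results lookup limit) :
    pick_default_symbols_py scanner_results lookup limit = pick_default_symbols_py_alt scanner_results lookup limit := by
  by_cases hlim : limit ≤ 0
  · -- here B returns [] and, thanks to ¬D, so does A
    have hB : pick_default_symbols_py_alt scanner_results lookup limit = [] := by
      unfold pick_default_symbols_py_alt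
      have : (max limit 0).toNat = 0 := by omega
      simp [this]
    rw [hB]
    unfold D_pick_default_symbols_py at hD
    cases scanner_results with
    | nil =>
      have hbtc : ¬ (List.lookup "BTC" lookup).isSome = true := by
        intro h; exact hD ⟨hlim, by simpa using h⟩
      unfold pick_default_symbols_py
      simp [pickA_scan, pvFallbackSymbols, pickA_fb, hbtc, hlim]
    | cons c rest =>
      have hcoin : (List.lookup "coin" c).getD "" = "" := by
        by_contra h; exact hD ⟨hlim, by simpa using h⟩
      unfold pick_default_symbols_py
      simp only [pickA_scan]
      have hs1 : (match List.lookup "coin" c with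
          | some coin => if coin ≠ "" ∧ ¬ ([] : List String).contains coin then [] ++ [coin] else []
          | none => ([] : List String)) = [] := by
        cases h : List.lookup "coin" c with
        | none => rfl
        | some coin =>
          have : coin = "" := by simpa [h] using hcoin
          simp [this]
      rw [hs1]
      simp [hlim]
  · -- normal case: 0 < limit.  B = take limit of one big Set.add-fold; split the fold with foldl_append.
    have h0 : (([] : List String).length : Int) < limit := by simpa using (by omega : 0 < limit)
    have hmax : max limit 0 = limit := by omega
    unfold pick_default_symbols_py pick_default_symbols_py_alt
    rw [pickA_scan_eq limit scanner_results [] h0]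
    simp only [PySem.List.dedup_eq_ofList, PySem.Set.ofList_eq_foldl, List.foldl_append, hmax]
    set S := (coinsOf scanner_results).foldl PySem.Set.add [] with hS
    have hSeq : (scanner_results.filter (fun c => (List.lookup "coin" c).getD "" ≠ "")).map
        (fun c => (List.lookup "coin" c).getD "") = coinsOf scanner_results := rfl
    rw [hSeq, ← hS]
    by_cases hreach : limit ≤ ((S.length : Int))
    · -- the first loop returned early: the fallback fold only appends past position `limit`
      obtain ⟨t, ht⟩ := foldl_add_prefix (pvFallbackSymbols.filter (fun c => (List.lookup c lookup).isSome)) S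
      have htake : ((pvFallbackSymbols.filter (fun c => (List.lookup c lookup).isSome)).foldl PySem.Set.add S).take limit.toNat
          = S.take limit.toNat := by
        rw [ht, List.take_append_of_le_length (by omega)]
      simp [hreach, htake]
    · -- fell through below the limit: S.take limit = S, then the fallback loop is the second fold
      have hSfull : S.take limit.toNat = S := List.take_of_length_le (by omega)
      have hd : decide (limit ≤ ((S.length : Nat) : Int)) = false := decide_eq_false hreach
      rw [hd]
      simp only [hSfull]
      exact pickA_fb_eq lookup limit pvFallbackSymbols S (by omega)

-- ===== VERDICT (by name: the statements are the Claim_ definitions above) =====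
theorem pick_default_symbols_py_spec : Claim_unchanged_pick_default_symbols_py := by
  intro scanner_results lookup limit _ hD
  exact main_eq scanner_results lookup limit hD

theorem pick_default_symbols_py_changed : Claim_changed_pick_default_symbols_py := by
  unfold Claim_changed_pick_default_symbols_py; decide

theorem pick_default_symbols_py_tight : Claim_exact_pick_default_symbols_py := by
  intro scanner_results lookup limit _ hD
  obtain ⟨hlim, hX⟩ := hD
  have hB : pick_default_symbols_py_alt scanner_results lookup limit = [] := by
    unfold pick_default_symbols_py_alt
    have : (max limit 0).toNat = 0 := by omega
    simp [this]
  rw [hB]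
  cases scanner_results with
  | nil =>
    have hbtc : (List.lookup "BTC" lookup).isSome = true := by simpa using hX
    unfold pick_default_symbols_py
    simp [pickA_scan, pvFallbackSymbols, pickA_fb, hbtc, show limit ≤ (1 : Int) by omega]
  | cons c rest =>
    have hX' : (List.lookup "coin" c).getD "" ≠ "" := by simpa using hX
    unfold pick_default_symbols_py
    simp only [pickA_scan]
    cases h : List.lookup "coin" c with
    | none => simp [h] at hX'
    | some coin =>
      have hc : coin ≠ "" := by simpa [h] using hX'
      simp [hc, show limit ≤ (1 : Int) by omega]
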